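-- pv_equiv track=rewrite | github.com/yuyan235813/balance_platform | utils/com_interface_utils.py | format_data_3168
-- ===== SOURCE A (Python) =====
-- def format_data_3168(data):
--     """
--     数据格式:
--      每隔 100ms 发送一组数据.每组数据 5 帧,每帧
--     数据有 11 位:1 位起始位(0),8 位数据位,2 位停止位(1)。
--     第 1 帧：D0～D7······0FFH(起始标志帧)。
--     第 2 帧：D0～D2······小 数点位置(0-5)。
--     D4······1 表示称重值稳定,0 表示不稳定。
--     D5······1 表示重量为负值,0 表示重量为正值。
--     D7······1 表示超载。
--     第 3 帧:D0～D3 位为重量值个位的 BCD 码。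
--      D4～D7 位为重量值十位的 BCD 码。
--     第 4 帧 :D0～D3 位 为重量值百位的 BCD 码。
--      D4～D7 位为重量值千位的 BCD 码。
--     第 5 帧:D0～D3 位为重量值万位的 BCD 码。
--      D4～D7 位为重量值十万位的 BCD 码。
--     :param data:
--     :return:
--     """
--     if not data:
--         return 0
--     ret = 0
--     for item in data[-1:1:-1]:
--         ret = ret * 100 + item - (item >> 4) * 6
--     symbol = -1 if data[1] & 0x20 else 1
--     return symbol * ret
-- ===== SOURCE B (Python) =====
-- def _bcd_value(ds):
--     n = len(ds)
--     if n <= 1: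
--         return ds[0] if ds else 0
--     m = n // 2
--     return _bcd_value(ds[:m]) + 100 ** m * _bcd_value(ds[m:])
--
-- def format_data_3168(data):
--     if not data:
--         return 0
--     sign = -1 if data[1] & 0x20 else 1
--     digits = [item - (item >> 4) * 6 for item in data[2:]]
--     return sign * _bcd_value(digits)
-- ===== Notes on version B (the rewrite author's own statement) =====
-- stated objective: faster
-- what changed: Replaces the reverse-slice Horner accumulator loop (ret = ret*100 + decode) with a staged pipeline: decode data[2:] into a digit-pair list, then evaluate it by divide-and-conquer (value(left half) + 100**m * value(right half)), which is subquadratic in bignum digit operations where Horner is quadratic.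
-- outside the precondition, e.g. on format_data_3168([1]): A raises IndexError, B raises IndexError
import Mathlib
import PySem

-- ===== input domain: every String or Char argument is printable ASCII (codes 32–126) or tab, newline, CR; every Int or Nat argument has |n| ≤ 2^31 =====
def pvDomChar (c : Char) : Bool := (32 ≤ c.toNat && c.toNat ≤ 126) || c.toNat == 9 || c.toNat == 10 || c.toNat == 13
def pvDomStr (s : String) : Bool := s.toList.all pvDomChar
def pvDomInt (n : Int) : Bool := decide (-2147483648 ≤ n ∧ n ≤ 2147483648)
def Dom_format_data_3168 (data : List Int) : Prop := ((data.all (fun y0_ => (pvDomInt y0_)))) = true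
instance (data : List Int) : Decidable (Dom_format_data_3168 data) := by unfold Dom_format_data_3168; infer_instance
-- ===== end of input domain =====

-- B replaces A's reverse-slice Horner accumulator with a staged pipeline: decode data[2:]
-- into digit pairs, then evaluate by divide-and-conquer (objective: faster on large inputs).

-- ===== PORT A =====
def format_data_3168 (data : List Int) : Int :=
  if data = [] then 0
  else
    -- for item in data[-1:1:-1]: ret = ret * 100 + item - (item >> 4) * 6
    let ret := ((PySem.List.slice? data (some (-1)) (some 1) (-1)).getD []).foldl
      (fun (ret item : Int) => ret * 100 + item - (item >>> (4:Nat)) * 6) 0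
    -- symbol = -1 if data[1] & 0x20 else 1  (data[1] raises for length-1 input: excluded by Pre_)
    let symbol : Int := if PySem.Int.band (PySem.List.pyGetD data 1 0) 32 ≠ 0 then -1 else 1
    symbol * ret

-- ===== PORT B =====
-- helper _bcd_value: divide-and-conquer evaluation of a decoded digit-pair list
def pvBcdValue (ds : List Int) : Int :=
  if ds.length ≤ 1 then ds.headD 0   -- ds[0] if ds else 0
  else
    let m := ds.length / 2
    pvBcdValue (ds.take m) + 100 ^ m * pvBcdValue (ds.drop m)
termination_by ds.length
decreasing_by
  · simp only [List.length_take]; omega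
  · simp only [List.length_drop]; omega

def format_data_3168_alt (data : List Int) : Int :=
  if data = [] then 0
  else
    -- sign = -1 if data[1] & 0x20 else 1  (data[1] raises for length-1 input: excluded by Pre_)
    let sign : Int := if PySem.Int.band (PySem.List.pyGetD data 1 0) 32 ≠ 0 then -1 else 1
    -- digits = [item - (item >> 4) * 6 for item in data[2:]]
    let digits := (PySem.List.slice data (some 2) none).map
      (fun (item : Int) => item - (item >>> (4:Nat)) * 6)
    sign * pvBcdValue digits

-- ===== PRECONDITION & SPEC =====
-- Pre_ excludes exactly the length-1 lists, on which both A and B raise IndexError at data[1].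
def Pre_format_data_3168 (data : List Int) : Prop := data = [] ∨ 2 ≤ data.length
instance (data : List Int) : Decidable (Pre_format_data_3168 data) := by
  unfold Pre_format_data_3168; infer_instance
def pvWitness_format_data_3168 : List Int := [255, 32, 37, 18]
def Spec_format_data_3168 (data : List Int) (out : Int) : Prop := out = format_data_3168_alt data
instance (data : List Int) (out : Int) : Decidable (Spec_format_data_3168 data out) := by
  unfold Spec_format_data_3168; infer_instance

-- ===== CLAIM (what is proved, stated in full; the proofs are below) =====
def Claim_equal_format_data_3168 : Prop := ∀ (data : List Int), Dom_format_data_3168 data → Pre_format_data_3168 data → Spec_format_data_3168 data (format_data_3168 data)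

-- ===== LEMMAS AND PROOFS =====

-- Positional value of a decoded digit-pair list, lowest-order first.
def pvSumD : List Int → Int
  | [] => 0
  | d :: ds => d + 100 * pvSumD ds

theorem pvSumD_append (a b : List Int) :
    pvSumD (a ++ b) = pvSumD a + 100 ^ a.length * pvSumD b := by
  induction a with
  | nil => simp [pvSumD]
  | cons x xs ih =>
    simp only [List.cons_append, pvSumD, ih, List.length_cons, pow_succ]
    ring

-- The divide-and-conquer evaluator computes the positional value.
theorem pvBcdValue_eq (ds : List Int) : pvBcdValue ds = pvSumD ds := by
  fun_induction pvBcdValue ds with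
  | case1 ds h =>
    match ds, h with
    | [], _ => simp [pvSumD]
    | [x], _ => simp [pvSumD]
  | case2 ds h m ih1 ih2 =>
    rw [ih1, ih2]
    have hm : (ds.take m).length = m := by simp only [List.length_take]; omega
    conv_rhs => rw [← List.take_append_drop m ds]
    rw [pvSumD_append, hm]

-- A's reverse Horner loop computes the positional value of the decoded unreversed list.
theorem pvHornerA (l : List Int) (r : Int) :
    l.reverse.foldl (fun (ret item : Int) => ret * 100 + item - (item >>> (4:Nat)) * 6) r
      = r * 100 ^ l.length + pvSumD (l.map (fun (item : Int) => item - (item >>> (4:Nat)) * 6)) := by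
  induction l generalizing r with
  | nil => simp [pvSumD]
  | cons x xs ih =>
    simp only [List.reverse_cons, List.foldl_append, List.foldl_cons, List.foldl_nil, ih,
      List.map_cons, pvSumD, List.length_cons]
    ring

-- A's slice data[-1:1:-1] is the reverse of data[2:] when the list has at least 2 elements.
theorem pvSliceRev (xs : List Int) (h : 2 ≤ xs.length) :
    PySem.List.slice? xs (some (-1)) (some 1) (-1) = some ((xs.drop 2).reverse) := by
  unfold PySem.List.slice? PySem.List.sliceIndices
  simp only [if_neg (by norm_num : ¬ ((-1:Int) = 0)), if_pos (by norm_num : ((-1:Int) < 0))]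
  have h1 : max (-1 + (xs.length:Int)) (-1) = xs.length - 1 := by omega
  have h2 : min (1:Int) ((xs.length:Int) - 1) = 1 := by omega
  simp only [h1, h2]
  norm_num
  have hc : ((if (1:Int) < (xs.length:Int) - 1 then xs.length - 1 - 1 else 0)) = xs.length - 2 := by
    split_ifs <;> omega
  rw [hc]
  have hg : ∀ k ∈ List.range (xs.length - 2),
      xs[((xs.length:Int) - 1 + -(k:Int)).toNat]? = some (xs.getD (xs.length - 1 - k) 0) := by
    intro k hk
    simp only [List.mem_range] at hk
    have hidx : ((xs.length:Int) - 1 + -(k:Int)).toNat = xs.length - 1 - k := by omega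
    rw [hidx, List.getElem?_eq_getElem (by omega), List.getD_eq_getElem _ _ (by omega)]
  rw [List.filterMap_congr hg]
  rw [show (fun x => some (xs.getD (xs.length - 1 - x) 0))
        = some ∘ (fun x => xs.getD (xs.length - 1 - x) 0) from rfl, List.filterMap_eq_map]
  apply List.ext_getElem
  · simp
  · intro i h1' h2'
    simp only [List.length_map, List.length_range] at h1'
    simp only [List.length_reverse, List.length_drop] at h2'
    simp only [List.getElem_map, List.getElem_range, List.getElem_reverse, List.getElem_drop,
      List.length_drop]
    rw [List.getD_eq_getElem _ _ (by omega)]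
    congr 1
    omega

-- ===== VERDICT (by name: the statement is the Claim_ definition above) =====
theorem format_data_3168_spec : Claim_equal_format_data_3168 := by
  intro data _ hpre
  unfold Spec_format_data_3168 format_data_3168 format_data_3168_alt
  rcases hpre with h | h
  · simp [h]
  · have hne : data ≠ [] := by intro hn; rw [hn] at h; simp at h
    rw [if_neg hne, if_neg hne]
    rw [pvSliceRev data h, Option.getD_some, pvHornerA]
    have hs : PySem.List.slice data (some 2) none = data.drop 2 :=
      PySem.List.slice_from data (by norm_num)
    rw [hs]
    simp only [pvBcdValue_eq]
    split_ifs <;> ring
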